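-- pv_equiv track=rewrite | github.com/alexiacsousa/Group_J | app/pages/2_AI_Risk_Analysis.py | parse_assessment
-- ===== SOURCE A (Python) =====
-- def parse_assessment(assessment: str) -> tuple[str, str]:
--     """Extracts danger flag (Y/N) and risk level (Low/Medium/High) from the assessment text."""
--     danger_flag = "N"
--     risk_level = "Unknown"
--
--     for line in assessment.splitlines():
--         line_lower = line.lower()
--         if line_lower.startswith("danger:"):
--             value = line.split(":", 1)[1].strip().upper()
--             danger_flag = "Y" if "YES" in value or value == "Y" else "N"
--         elif line_lower.startswith("risk level:"):
--             value = line.split(":", 1)[1].strip()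
--             if any(level in value.lower() for level in ["low", "medium", "high"]):
--                 risk_level = value.strip()
--
--     return danger_flag, risk_level
-- ===== SOURCE B (Python) =====
-- def parse_assessment(assessment: str) -> tuple[str, str]:
--     """Extracts danger flag (Y/N) and risk level (Low/Medium/High) from the assessment text."""
--     danger_flag = "N"
--     risk_level = "Unknown"
--     danger_done = False
--     risk_done = False
--
--     for line in reversed(assessment.splitlines()):
--         if danger_done and risk_done:
--             break
--         low = line.lower()
--         if not danger_done and low.startswith("danger:"):
--             value = line.split(":", 1)[1].strip().upper()
--             danger_flag = "Y" if "YES" in value or value == "Y" else "N"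
--             danger_done = True
--         elif not risk_done and low.startswith("risk level:"):
--             value = line.split(":", 1)[1].strip()
--             vl = value.lower()
--             if "low" in vl or "medium" in vl or "high" in vl:
--                 risk_level = value
--                 risk_done = True
--
--     return danger_flag, risk_level
-- ===== Notes on version B (the rewrite author's own statement) =====
-- stated objective: alternative
-- what changed: B scans the lines in reverse with done-flags and an early break (first danger line / first valid risk line seen from the end wins), instead of A's forward scan that keeps overwriting both fields to the end.
import Mathlib
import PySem

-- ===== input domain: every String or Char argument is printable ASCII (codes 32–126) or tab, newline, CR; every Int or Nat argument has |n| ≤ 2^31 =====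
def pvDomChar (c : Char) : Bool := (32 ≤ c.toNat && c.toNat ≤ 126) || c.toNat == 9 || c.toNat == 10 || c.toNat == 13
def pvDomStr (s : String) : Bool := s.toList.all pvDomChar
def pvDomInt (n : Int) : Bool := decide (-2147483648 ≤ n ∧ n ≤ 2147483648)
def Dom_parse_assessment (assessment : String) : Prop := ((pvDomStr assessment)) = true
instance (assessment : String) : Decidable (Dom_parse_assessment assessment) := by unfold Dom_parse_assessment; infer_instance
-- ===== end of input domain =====

-- B scans the lines in reverse with done-flags and an early break; A scans forward overwriting to the end.

-- ===== PORT A =====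
def parse_assessment (assessment : String) : String × String :=
  (PySem.Str.splitlines assessment).foldl
    (fun st line =>
      let line_lower := PySem.Str.lower line
      if PySem.Str.startswith line_lower "danger:" then
        let value := PySem.Str.upper (PySem.Str.strip (((PySem.Str.splitMax? line ":" 1).getD []).getD 1 ""))
        (if PySem.Str.isIn "YES" value || value == "Y" then "Y" else "N", st.2)
      else if PySem.Str.startswith line_lower "risk level:" then
        let value := PySem.Str.strip (((PySem.Str.splitMax? line ":" 1).getD []).getD 1 "")
        if [("low" : String), "medium", "high"].any (fun lvl => PySem.Str.isIn lvl (PySem.Str.lower value)) then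
          (st.1, PySem.Str.strip value)
        else st
      else st)
    ("N", "Unknown")

-- ===== PORT B =====
def parseAssessmentRev : List String → Bool → Bool → String → String → String × String
  | [], _, _, d, r => (d, r)
  | line :: rest, dd, rd, d, r =>
    if dd && rd then (d, r)
    else
      let low := PySem.Str.lower line
      if !dd && PySem.Str.startswith low "danger:" then
        let value := PySem.Str.upper (PySem.Str.strip (((PySem.Str.splitMax? line ":" 1).getD []).getD 1 ""))
        parseAssessmentRev rest true rd (if PySem.Str.isIn "YES" value || value == "Y" then "Y" else "N") r
      else if !rd && PySem.Str.startswith low "risk level:" then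
        let value := PySem.Str.strip (((PySem.Str.splitMax? line ":" 1).getD []).getD 1 "")
        let vl := PySem.Str.lower value
        if PySem.Str.isIn "low" vl || PySem.Str.isIn "medium" vl || PySem.Str.isIn "high" vl then
          parseAssessmentRev rest dd true d value
        else
          parseAssessmentRev rest dd rd d r
      else
        parseAssessmentRev rest dd rd d r

def parse_assessment_alt (assessment : String) : String × String :=
  parseAssessmentRev (PySem.Str.splitlines assessment).reverse false false "N" "Unknown"

-- ===== PRECONDITION & SPEC =====
def Spec_parse_assessment (assessment : String) (out : String × String) : Prop := out = parse_assessment_alt assessment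
instance (assessment : String) (out : String × String) : Decidable (Spec_parse_assessment assessment out) := by unfold Spec_parse_assessment; infer_instance

-- ===== CLAIM (what is proved, stated in full; the proofs are below) =====
def Claim_equal_parse_assessment : Prop := ∀ (assessment : String), Dom_parse_assessment assessment → Spec_parse_assessment assessment (parse_assessment assessment)

-- ===== LEMMAS AND PROOFS =====

/-- A's loop body, named for the proofs. -/
def stepA (st : String × String) (line : String) : String × String :=
  let line_lower := PySem.Str.lower line
  if PySem.Str.startswith line_lower "danger:" then
    let value := PySem.Str.upper (PySem.Str.strip (((PySem.Str.splitMax? line ":" 1).getD []).getD 1 ""))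
    (if PySem.Str.isIn "YES" value || value == "Y" then "Y" else "N", st.2)
  else if PySem.Str.startswith line_lower "risk level:" then
    let value := PySem.Str.strip (((PySem.Str.splitMax? line ":" 1).getD []).getD 1 "")
    if [("low" : String), "medium", "high"].any (fun lvl => PySem.Str.isIn lvl (PySem.Str.lower value)) then
      (st.1, PySem.Str.strip value)
    else st
  else st

def isD (line : String) : Bool := PySem.Str.startswith (PySem.Str.lower line) "danger:"
def isR (line : String) : Bool := PySem.Str.startswith (PySem.Str.lower line) "risk level:"
def dval (line : String) : String :=
  let value := PySem.Str.upper (PySem.Str.strip (((PySem.Str.splitMax? line ":" 1).getD []).getD 1 ""))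
  if PySem.Str.isIn "YES" value || value == "Y" then "Y" else "N"
def rraw (line : String) : String := PySem.Str.strip (((PySem.Str.splitMax? line ":" 1).getD []).getD 1 "")
def rok (line : String) : Bool :=
  let vl := PySem.Str.lower (rraw line)
  PySem.Str.isIn "low" vl || PySem.Str.isIn "medium" vl || PySem.Str.isIn "high" vl

def dstep (d : String) (line : String) : String := if isD line then dval line else d
def rstep (r : String) (line : String) : String :=
  if !isD line && (isR line && rok line) then PySem.Str.strip (rraw line) else r

theorem dropWhile_self_of_prefix {p : Char → Bool} {u t : List Char}
    (hu : u <+: t) (ht : List.dropWhile p t = t) : List.dropWhile p u = u := by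
  cases u with
  | nil => simp
  | cons a u' =>
    obtain ⟨s, hs⟩ := hu
    subst hs
    cases ht' : List.dropWhile p (a :: u' ++ s) with
    | nil => simp_all
    | cons b l =>
      rw [ht'] at ht
      have hb : p b = false := by
        have h := List.head?_dropWhile_not p (a :: u' ++ s)
        rw [ht'] at h
        simpa using h
      have hab : a = b := by simpa using (congrArg (fun l => l.head?) ht).symm
      subst hab
      simp [hb]

theorem dropWhile_dropWhile (p : Char → Bool) (l : List Char) :
    List.dropWhile p (List.dropWhile p l) = List.dropWhile p l := by
  induction l with
  | nil => simp
  | cons a t ih =>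
    by_cases h : p a = true
    · simp [h, ih]
    · simp [h]

theorem chars_strip_idem (l : List Char) :
    PySem.Chars.strip (PySem.Chars.strip l) = PySem.Chars.strip l := by
  unfold PySem.Chars.strip PySem.Chars.rstrip PySem.Chars.lstrip
  set p := PySem.Chars.isspace
  set t := List.dropWhile p l with ht
  have htt : List.dropWhile p t = t := dropWhile_dropWhile p l
  have hpre : (List.dropWhile p t.reverse).reverse <+: t := by
    have h := List.reverse_prefix.mpr (List.dropWhile_suffix (l := t.reverse) p)
    simpa using h
  rw [dropWhile_self_of_prefix hpre htt, List.reverse_reverse, dropWhile_dropWhile]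

theorem strip_idem (s : String) : PySem.Str.strip (PySem.Str.strip s) = PySem.Str.strip s := by
  simp [PySem.Str.strip, chars_strip_idem]

theorem isD_isR_exclusive (line : String) : isD line = true → isR line = false := by
  intro h
  unfold isD at h
  unfold isR
  rw [PySem.Str.startswith, PySem.Chars.startswith_iff] at h
  by_contra hr
  rw [Bool.not_eq_false, PySem.Str.startswith, PySem.Chars.startswith_iff] at hr
  have hor := List.prefix_or_prefix_of_prefix h hr
  revert hor
  decide

/-- The reverse-scan recursion, restated through the named predicates (definitional). -/
theorem rev_cons (x : String) (t : List String) (dd rd : Bool) (d r : String) :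
    parseAssessmentRev (x :: t) dd rd d r =
      if dd && rd then (d, r)
      else if !dd && isD x then parseAssessmentRev t true rd (dval x) r
      else if !rd && isR x then
        (if rok x then parseAssessmentRev t dd true d (rraw x)
         else parseAssessmentRev t dd rd d r)
      else parseAssessmentRev t dd rd d r := rfl

theorem any_eq_rok (line : String) :
    ([("low" : String), "medium", "high"].any
      (fun lvl => PySem.Str.isIn lvl (PySem.Str.lower (rraw line)))) = rok line := by
  unfold rok
  simp only [List.any_cons, List.any_nil, Bool.or_false, Bool.or_assoc]

theorem stepA_eq (st : String × String) (line : String) :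
    stepA st line = (dstep st.1 line, rstep st.2 line) := by
  unfold stepA dstep rstep
  show (if isD line = true then _ else if isR line = true then _ else st) = _
  by_cases hd : isD line = true
  · rw [if_pos hd, if_pos hd, if_neg (by rw [hd]; simp)]
    rfl
  · rw [if_neg hd, if_neg hd]
    rw [Bool.not_eq_true] at hd
    by_cases hr : isR line = true
    · rw [if_pos hr]
      show (if ([("low" : String), "medium", "high"].any
          (fun lvl => PySem.Str.isIn lvl (PySem.Str.lower (rraw line)))) = true
        then (st.1, PySem.Str.strip (rraw line)) else st) = _
      rw [any_eq_rok]
      by_cases hok : rok line = true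
      · rw [if_pos hok, if_pos (by rw [hd, hr, hok]; rfl)]
      · rw [if_neg hok, if_neg (by rw [Bool.not_eq_true] at hok; rw [hd, hr, hok]; simp)]
    · rw [Bool.not_eq_true] at hr
      rw [if_neg (by rw [hr]; simp), if_neg (by rw [hd, hr]; simp)]

theorem foldl_stepA (l : List String) (d r : String) :
    l.foldl stepA (d, r) = (l.foldl dstep d, l.foldl rstep r) := by
  induction l generalizing d r with
  | nil => rfl
  | cons x t ih => rw [List.foldl_cons, stepA_eq, List.foldl_cons, List.foldl_cons]; exact ih _ _

theorem parseAssessmentRev_eq (rl : List String) (dd rd : Bool) (d r : String) :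
    parseAssessmentRev rl dd rd d r =
      ((if dd then d else rl.reverse.foldl dstep d),
       (if rd then r else rl.reverse.foldl rstep r)) := by
  induction rl generalizing dd rd d r with
  | nil => cases dd <;> cases rd <;> simp [parseAssessmentRev]
  | cons x t ih =>
    rw [rev_cons]
    simp only [List.reverse_cons, List.foldl_append, List.foldl_cons, List.foldl_nil]
    have hstrip : PySem.Str.strip (rraw x) = rraw x := by
      unfold rraw; rw [strip_idem]
    cases dd <;> cases rd <;>
      by_cases hdx : isD x = true <;>
      first
        | (have hrx : isR x = false := isD_isR_exclusive x hdx
           simp_all [dstep, rstep])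
        | (by_cases hrx : isR x = true <;>
           by_cases hok : rok x = true <;>
           simp_all [dstep, rstep])

-- ===== VERDICT (by name: the statement is the Claim_ definition above) =====
theorem parse_assessment_spec : Claim_equal_parse_assessment := by
  intro assessment _
  unfold Spec_parse_assessment parse_assessment_alt
  rw [parseAssessmentRev_eq]
  simp only [List.reverse_reverse, Bool.false_eq_true, if_false]
  show (PySem.Str.splitlines assessment).foldl stepA ("N", "Unknown") = _
  rw [foldl_stepA]
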